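-- pv_equiv track=rewrite | github.com/ShashankBejjanki1241/ApexHire | src/scorer.py | _identify_highlights
-- ===== SOURCE A (Python) =====
-- from typing import Dict, List, Any, Set
--
-- def _identify_highlights(resume_analysis: Dict[str, Any]) -> List[str]:
--     """Identify key highlights from the resume"""
--     highlights = []
--
--     # Experience highlights
--     experience = resume_analysis.get('experience', [])
--     if experience:
--         highlights.append(f"Strong experience with {len(experience)} professional roles")
--
--     # Skills highlights
--     skills = resume_analysis.get('skills_found', {})
--     tech_skills = skills.get('technical_skills', [])
--     if len(tech_skills) > 50:
--         highlights.append(f"Comprehensive technical skill set ({len(tech_skills)} skills identified)")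
--
--     # Specific technology highlights
--     if any('swift' in skill.lower() for skill in tech_skills):
--         highlights.append("Expert Swift and iOS development experience")
--
--     if any('firebase' in skill.lower() for skill in tech_skills):
--         highlights.append("Strong Firebase and cloud integration experience")
--
--     if any('agile' in skill.lower() for skill in tech_skills):
--         highlights.append("Agile methodology and team collaboration experience")
--
--     if any('accessibility' in skill.lower() for skill in tech_skills):
--         highlights.append("Accessibility and inclusive design experience")
--
--     if any('testing' in skill.lower() for skill in tech_skills):
--         highlights.append("Comprehensive testing and quality assurance experience")
--
--     return highlights
-- ===== SOURCE B (Python) =====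
-- def _identify_highlights(resume_analysis):
--     """Single pass over tech_skills with a keyword/message table instead of five any() scans."""
--     table = [
--         ("swift", "Expert Swift and iOS development experience"),
--         ("firebase", "Strong Firebase and cloud integration experience"),
--         ("agile", "Agile methodology and team collaboration experience"),
--         ("accessibility", "Accessibility and inclusive design experience"),
--         ("testing", "Comprehensive testing and quality assurance experience"),
--     ]
--     experience = resume_analysis.get('experience', [])
--     tech_skills = resume_analysis.get('skills_found', {}).get('technical_skills', [])
--     flags = [False] * len(table)
--     for skill in tech_skills:
--         s = skill.lower()
--         flags = [f or kw in s for f, (kw, _) in zip(flags, table)]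
--     out = []
--     if experience:
--         out.append(f"Strong experience with {len(experience)} professional roles")
--     if len(tech_skills) > 50:
--         out.append(f"Comprehensive technical skill set ({len(tech_skills)} skills identified)")
--     for f, (_, msg) in zip(flags, table):
--         if f:
--             out.append(msg)
--     return out
-- ===== Notes on version B (the rewrite author's own statement) =====
-- stated objective: alternative
-- what changed: Replaces the five separate any(... in skill.lower()) scans over tech_skills with one pass that lowercases each skill once and updates five presence flags driven by an ordered (keyword, message) table, then emits the highlights from the table.
import Mathlib
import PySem

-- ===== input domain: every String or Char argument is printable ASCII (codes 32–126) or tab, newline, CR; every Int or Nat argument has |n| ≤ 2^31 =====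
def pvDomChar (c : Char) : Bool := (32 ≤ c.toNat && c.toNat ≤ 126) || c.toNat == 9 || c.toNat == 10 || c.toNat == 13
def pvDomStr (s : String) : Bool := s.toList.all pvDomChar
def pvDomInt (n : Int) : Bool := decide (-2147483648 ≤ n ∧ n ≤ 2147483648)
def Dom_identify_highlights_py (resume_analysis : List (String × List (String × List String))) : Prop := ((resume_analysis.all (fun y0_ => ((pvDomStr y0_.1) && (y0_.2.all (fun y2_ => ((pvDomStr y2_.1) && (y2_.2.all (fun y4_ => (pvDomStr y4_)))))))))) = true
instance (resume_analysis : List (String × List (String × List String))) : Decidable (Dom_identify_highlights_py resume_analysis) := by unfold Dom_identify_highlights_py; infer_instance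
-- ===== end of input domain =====

-- B replaces A's five separate any-scans over tech_skills by one pass with a keyword/message table; same outputs (objective: alternative).

-- ===== PORT A =====
-- dict.get(k, dflt) on an association list: first match (both Pythons use .get the same way)
def pyGetD {α : Type} (d : List (String × α)) (k : String) (dflt : α) : α :=
  ((d.find? (fun p => p.1 == k)).map Prod.snd).getD dflt

def identify_highlights_py (resume_analysis : List (String × List (String × List String))) : List String :=
  let highlights : List String := []
  let experience := pyGetD resume_analysis "experience" []
  let highlights := if !experience.isEmpty then
      highlights ++ ["Strong experience with " ++ PySem.Int.toStr (experience.length : Int) ++ " professional roles"]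
    else highlights
  let skills := pyGetD resume_analysis "skills_found" []
  let tech_skills := pyGetD skills "technical_skills" []
  let highlights := if decide (tech_skills.length > 50) then
      highlights ++ ["Comprehensive technical skill set (" ++ PySem.Int.toStr (tech_skills.length : Int) ++ " skills identified)"]
    else highlights
  let highlights := if tech_skills.any (fun skill => PySem.Str.isIn "swift" (PySem.Str.lower skill)) then
      highlights ++ ["Expert Swift and iOS development experience"] else highlights
  let highlights := if tech_skills.any (fun skill => PySem.Str.isIn "firebase" (PySem.Str.lower skill)) then
      highlights ++ ["Strong Firebase and cloud integration experience"] else highlights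
  let highlights := if tech_skills.any (fun skill => PySem.Str.isIn "agile" (PySem.Str.lower skill)) then
      highlights ++ ["Agile methodology and team collaboration experience"] else highlights
  let highlights := if tech_skills.any (fun skill => PySem.Str.isIn "accessibility" (PySem.Str.lower skill)) then
      highlights ++ ["Accessibility and inclusive design experience"] else highlights
  let highlights := if tech_skills.any (fun skill => PySem.Str.isIn "testing" (PySem.Str.lower skill)) then
      highlights ++ ["Comprehensive testing and quality assurance experience"] else highlights
  highlights

-- ===== PORT B =====
def pvTable : List (String × String) :=
  [("swift", "Expert Swift and iOS development experience"),
   ("firebase", "Strong Firebase and cloud integration experience"),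
   ("agile", "Agile methodology and team collaboration experience"),
   ("accessibility", "Accessibility and inclusive design experience"),
   ("testing", "Comprehensive testing and quality assurance experience")]

def identify_highlights_py_alt (resume_analysis : List (String × List (String × List String))) : List String :=
  let experience := pyGetD resume_analysis "experience" []
  let tech_skills := pyGetD (pyGetD resume_analysis "skills_found" []) "technical_skills" []
  let flags := tech_skills.foldl
    (fun flags skill =>
      let s := PySem.Str.lower skill
      (flags.zip pvTable).map (fun p => p.1 || PySem.Str.isIn p.2.1 s))
    [false, false, false, false, false]
  let out : List String := []
  let out := if !experience.isEmpty then
      out ++ ["Strong experience with " ++ PySem.Int.toStr (experience.length : Int) ++ " professional roles"]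
    else out
  let out := if decide (tech_skills.length > 50) then
      out ++ ["Comprehensive technical skill set (" ++ PySem.Int.toStr (tech_skills.length : Int) ++ " skills identified)"]
    else out
  (flags.zip pvTable).foldl (fun out p => if p.1 then out ++ [p.2.2] else out) out

-- ===== PRECONDITION & SPEC =====
def Spec_identify_highlights_py (resume_analysis : List (String × List (String × List String))) (out : List String) : Prop := out = identify_highlights_py_alt resume_analysis
instance (resume_analysis : List (String × List (String × List String))) (out : List String) : Decidable (Spec_identify_highlights_py resume_analysis out) := by unfold Spec_identify_highlights_py; infer_instance

-- ===== CLAIM (what is proved, stated in full; the proofs are below) =====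
def Claim_equal_identify_highlights_py : Prop := ∀ (resume_analysis : List (String × List (String × List String))), Dom_identify_highlights_py resume_analysis → Spec_identify_highlights_py resume_analysis (identify_highlights_py resume_analysis)

-- ===== LEMMAS AND PROOFS =====

-- B's flag-updating fold computes exactly the five any-scans
theorem flags_eq (ts : List String) (b1 b2 b3 b4 b5 : Bool) :
    ts.foldl
      (fun flags skill =>
        let s := PySem.Str.lower skill
        (flags.zip pvTable).map (fun p => p.1 || PySem.Str.isIn p.2.1 s))
      [b1, b2, b3, b4, b5]
    = [b1 || ts.any (fun sk => PySem.Str.isIn "swift" (PySem.Str.lower sk)),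
       b2 || ts.any (fun sk => PySem.Str.isIn "firebase" (PySem.Str.lower sk)),
       b3 || ts.any (fun sk => PySem.Str.isIn "agile" (PySem.Str.lower sk)),
       b4 || ts.any (fun sk => PySem.Str.isIn "accessibility" (PySem.Str.lower sk)),
       b5 || ts.any (fun sk => PySem.Str.isIn "testing" (PySem.Str.lower sk))] := by
  induction ts generalizing b1 b2 b3 b4 b5 with
  | nil => simp
  | cons h t ih =>
    have step : (let s := PySem.Str.lower h
        ([b1, b2, b3, b4, b5].zip pvTable).map (fun p => p.1 || PySem.Str.isIn p.2.1 s))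
        = [b1 || PySem.Str.isIn "swift" (PySem.Str.lower h),
           b2 || PySem.Str.isIn "firebase" (PySem.Str.lower h),
           b3 || PySem.Str.isIn "agile" (PySem.Str.lower h),
           b4 || PySem.Str.isIn "accessibility" (PySem.Str.lower h),
           b5 || PySem.Str.isIn "testing" (PySem.Str.lower h)] := rfl
    rw [List.foldl_cons, step, ih]
    simp only [List.any_cons, Bool.or_assoc]

-- ===== VERDICT (by name: the statement is the Claim_ definition above) =====
theorem identify_highlights_py_spec : Claim_equal_identify_highlights_py := by
  intro ra _
  unfold Spec_identify_highlights_py identify_highlights_py identify_highlights_py_alt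
  simp only [flags_eq, Bool.false_or]
  simp only [pvTable, List.zip, List.zipWith, List.foldl]
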